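-- pv_equiv track=rewrite | github.com/Melania227/4InLine | 4ENLINEA - Morales Melania.py | tieneCeros_abajo
-- ===== SOURCE A (Python) =====
-- def tieneCeros_abajo(matriz):
--     res = []
--     columna = []
--     for i in range(0, len(matriz[0])):
--         for j in range(0, len(matriz)):
--             columna = columna + [matriz[j][i]]
--         res += [tieneCeros_abajo_aux(columna)]
--         columna = []
--     return res
--
-- def tieneCeros_abajo_aux(col):
--     tiene = False
--     i = 0
--
--     while tiene == False and i < len(col) - 1:
--         if col[i] != 0 and col[i + 1] == 0:
--             tiene = True
--         i += 1
--     return tiene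
-- ===== SOURCE B (Python) =====
-- def tieneCeros_abajo(matriz):
--     res = [False] * len(matriz[0])
--     for j in range(len(matriz) - 1):
--         fila = matriz[j]
--         abajo = matriz[j + 1]
--         for i in range(len(matriz[0])):
--             if fila[i] != 0 and abajo[i] == 0:
--                 res[i] = True
--     return res
-- ===== Notes on version B (the rewrite author's own statement) =====
-- stated objective: faster
-- what changed: B keeps one boolean per column and makes a single row-major pass over adjacent row pairs, instead of materialising each column by repeated list concatenation and scanning it with an early-exit helper.
import Mathlib
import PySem

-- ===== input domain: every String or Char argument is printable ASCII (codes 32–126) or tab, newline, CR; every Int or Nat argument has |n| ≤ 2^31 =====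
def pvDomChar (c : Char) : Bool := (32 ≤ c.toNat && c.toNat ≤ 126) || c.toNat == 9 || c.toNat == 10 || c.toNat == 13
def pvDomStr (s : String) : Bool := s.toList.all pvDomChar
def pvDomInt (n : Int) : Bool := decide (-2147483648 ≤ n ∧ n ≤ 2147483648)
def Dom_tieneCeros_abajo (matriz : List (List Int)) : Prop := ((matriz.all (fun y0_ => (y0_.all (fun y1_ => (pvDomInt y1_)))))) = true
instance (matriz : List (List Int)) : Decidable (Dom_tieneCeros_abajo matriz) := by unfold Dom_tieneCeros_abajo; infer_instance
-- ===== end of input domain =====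

-- B replaces A's column-building (quadratic repeated list concatenation) plus early-exit
-- column scan by a single row-major pass keeping one boolean per column; return value only.

-- ===== PORT A =====
-- while-loop of tieneCeros_abajo_aux: state (tiene, i); indices i, i+1 are in range
-- whenever the guard holds, so List.getD is exact there.
def tcAuxLoop (col : List Int) (tiene : Bool) (i : Nat) : Bool :=
  if h : tiene = false ∧ i < col.length - 1 then
    tcAuxLoop col (if col.getD i 0 ≠ 0 ∧ col.getD (i + 1) 0 = 0 then true else tiene) (i + 1)
  else tiene
termination_by col.length - 1 - i
decreasing_by omega

def tieneCeros_abajo_aux (col : List Int) : Bool := tcAuxLoop col false 0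

-- matriz[0] and matriz[j][i] are in range on Pre_ (matriz nonempty, rows at least as
-- long as row 0), so headD/getD are exact there.
def tieneCeros_abajo (matriz : List (List Int)) : List Bool :=
  (List.range (matriz.headD []).length).foldl
    (fun res i =>
      let columna := matriz.foldl (fun c fila => c ++ [fila.getD i 0]) []
      res ++ [tieneCeros_abajo_aux columna]) []

-- ===== PORT B =====
-- row-major pass: res[i] := True whenever matriz[j][i] != 0 and matriz[j+1][i] == 0;
-- same in-range argument as for port A, so getD is exact on Pre_.
def tieneCeros_abajo_alt (matriz : List (List Int)) : List Bool :=
  let ncols := (matriz.headD []).length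
  (List.range (matriz.length - 1)).foldl
    (fun res j =>
      let fila := matriz.getD j []
      let abajo := matriz.getD (j + 1) []
      (List.range ncols).foldl
        (fun r i => if fila.getD i 0 ≠ 0 ∧ abajo.getD i 0 = 0 then r.set i true else r)
        res)
    (List.replicate ncols false)

-- ===== PRECONDITION & SPEC =====
-- Pre_ excludes exactly the inputs where Python A raises: the empty matrix
-- (matriz[0] is an IndexError) and jagged matrices with a row shorter than row 0
-- (matriz[j][i] is an IndexError); B raises on the same inputs.
def Pre_tieneCeros_abajo (matriz : List (List Int)) : Prop :=
  matriz ≠ [] ∧ ∀ fila ∈ matriz, (matriz.headD []).length ≤ fila.length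
instance (matriz : List (List Int)) : Decidable (Pre_tieneCeros_abajo matriz) := by
  unfold Pre_tieneCeros_abajo; infer_instance

def pvWitness_tieneCeros_abajo : List (List Int) := [[1, 0], [0, 2]]

def Spec_tieneCeros_abajo (matriz : List (List Int)) (out : List Bool) : Prop := out = tieneCeros_abajo_alt matriz
instance (matriz : List (List Int)) (out : List Bool) : Decidable (Spec_tieneCeros_abajo matriz out) := by unfold Spec_tieneCeros_abajo; infer_instance

-- ===== CLAIM (what is proved, stated in full; the proofs are below) =====
def Claim_equal_tieneCeros_abajo : Prop := ∀ (matriz : List (List Int)), Dom_tieneCeros_abajo matriz → Pre_tieneCeros_abajo matriz → Spec_tieneCeros_abajo matriz (tieneCeros_abajo matriz)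

-- ===== LEMMAS AND PROOFS =====

-- the adjacent-pair condition at column i between rows j and j+1
abbrev pvCond (matriz : List (List Int)) (j i : Nat) : Prop :=
  (matriz.getD j []).getD i 0 ≠ 0 ∧ (matriz.getD (j + 1) []).getD i 0 = 0

lemma foldl_snoc {α β : Type} (f : α → β) (l : List α) (acc : List β) :
    l.foldl (fun c x => c ++ [f x]) acc = acc ++ l.map f := by
  induction l generalizing acc with
  | nil => simp
  | cons x xs ih => simp [ih]

lemma getD_map_getD (matriz : List (List Int)) (i k : Nat) :
    (matriz.map (fun fila => fila.getD i 0)).getD k 0 = (matriz.getD k []).getD i 0 := by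
  by_cases h : k < matriz.length
  · simp [List.getD_eq_getElem?_getD, List.getElem?_map, List.getElem?_eq_getElem h]
  · simp [List.getD_eq_getElem?_getD, List.getElem?_eq_none (by simpa using Nat.le_of_not_lt h),
      List.getElem?_map]

lemma tcAuxLoop_true (col : List Int) (i : Nat) : tcAuxLoop col true i = true := by
  unfold tcAuxLoop; simp

lemma tcAuxLoop_char (col : List Int) (i : Nat) :
    tcAuxLoop col false i
      = decide (∃ k, k < col.length - 1 ∧ i ≤ k ∧ col.getD k 0 ≠ 0 ∧ col.getD (k + 1) 0 = 0) := by
  suffices h : ∀ d i, col.length - 1 - i ≤ d →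
      tcAuxLoop col false i
        = decide (∃ k, k < col.length - 1 ∧ i ≤ k ∧ col.getD k 0 ≠ 0 ∧ col.getD (k + 1) 0 = 0) by
    exact h (col.length - 1 - i) i le_rfl
  intro d
  induction d with
  | zero =>
      intro i hi
      have hguard : ¬ i < col.length - 1 := by omega
      rw [tcAuxLoop, dif_neg (by simp [hguard])]
      symm
      simp only [decide_eq_false_iff_not]
      rintro ⟨k, hk1, hk2, _⟩
      omega
  | succ d ih =>
      intro i hi
      by_cases hguard : i < col.length - 1
      · rw [tcAuxLoop, dif_pos ⟨rfl, hguard⟩]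
        by_cases hc : col.getD i 0 ≠ 0 ∧ col.getD (i + 1) 0 = 0
        · rw [if_pos hc, tcAuxLoop_true]
          symm
          simp only [decide_eq_true_eq]
          exact ⟨i, hguard, le_rfl, hc⟩
        · rw [if_neg hc, ih (i + 1) (by omega)]
          apply decide_eq_decide.mpr
          constructor
          · rintro ⟨k, hk1, hk2, hk3⟩
            exact ⟨k, hk1, by omega, hk3⟩
          · rintro ⟨k, hk1, hk2, hk3⟩
            rcases Nat.eq_or_lt_of_le hk2 with rfl | hlt
            · exact absurd hk3 hc
            · exact ⟨k, hk1, hlt, hk3⟩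
      · rw [tcAuxLoop, dif_neg (by simp [hguard])]
        symm
        simp only [decide_eq_false_iff_not]
        rintro ⟨k, hk1, hk2, _⟩
        omega

-- A's result, in closed form
lemma portA_eq (matriz : List (List Int)) :
    tieneCeros_abajo matriz
      = (List.range (matriz.headD []).length).map
          (fun i => decide (∃ j, j < matriz.length - 1 ∧ pvCond matriz j i)) := by
  unfold tieneCeros_abajo
  rw [foldl_snoc (fun i =>
    tieneCeros_abajo_aux (matriz.foldl (fun c fila => c ++ [fila.getD i 0]) []))]
  simp only [List.nil_append]
  apply List.map_congr_left
  intro i _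
  rw [show matriz.foldl (fun c fila => c ++ [fila.getD i 0]) []
      = matriz.map (fun fila => fila.getD i 0) from by simpa using foldl_snoc _ matriz []]
  unfold tieneCeros_abajo_aux
  rw [tcAuxLoop_char]
  apply decide_eq_decide.mpr
  simp only [List.length_map, getD_map_getD, pvCond]
  constructor
  · rintro ⟨k, h1, _, h3⟩; exact ⟨k, h1, h3⟩
  · rintro ⟨k, h1, h3⟩; exact ⟨k, h1, Nat.zero_le k, h3⟩

lemma inner_length (p : Nat → Prop) [DecidablePred p] (nc : Nat) (r : List Bool) :
    ((List.range nc).foldl (fun r i => if p i then r.set i true else r) r).length = r.length := by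
  induction nc generalizing r with
  | zero => simp
  | succ nc ih =>
      rw [List.range_succ, List.foldl_append]
      simp only [List.foldl_cons, List.foldl_nil]
      split <;> simp [ih]

lemma setGetElem? (l : List Bool) (i j : Nat) (a : Bool) :
    (l.set i a)[j]? = if i = j ∧ i < l.length then some a else l[j]? := by
  rw [List.getElem?_set]
  split_ifs <;> first | rfl | (simp_all; omega) | simp_all

-- element-wise form of B's inner column loop
lemma inner_getElem? (p : Nat → Prop) [DecidablePred p] (nc : Nat) (r : List Bool) (t : Nat) :
    ((List.range nc).foldl (fun r i => if p i then r.set i true else r) r)[t]?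
      = r[t]?.map (fun b => b || (decide (t < nc) && decide (p t))) := by
  induction nc generalizing r with
  | zero =>
      simp only [List.range_zero, List.foldl_nil, Nat.not_lt_zero, decide_false,
        Bool.false_and, Bool.or_false]
      cases r[t]? <;> rfl
  | succ nc ih =>
      rw [List.range_succ, List.foldl_append]
      simp only [List.foldl_cons, List.foldl_nil]
      have hlen := inner_length p nc r
      by_cases hp : p nc
      · rw [if_pos hp, setGetElem?, hlen, ih]
        by_cases h : nc = t ∧ nc < r.length
        · obtain ⟨rfl, hlt⟩ := h
          rw [if_pos ⟨rfl, hlt⟩]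
          simp [List.getElem?_eq_getElem hlt, hp]
        · rw [if_neg h]
          by_cases hr : t < r.length
          · have hne : t ≠ nc := fun e => h ⟨e.symm, by omega⟩
            have hiff : (t < nc + 1) ↔ (t < nc) := by omega
            rw [decide_eq_decide.mpr hiff]
          · rw [List.getElem?_eq_none (show r.length ≤ t by omega)]
            rfl
      · rw [if_neg hp, ih]
        by_cases hr : t < r.length
        · by_cases ht : t = nc
          · subst ht
            simp [hp, List.getElem?_eq_getElem hr]
          · have hiff : (t < nc + 1) ↔ (t < nc) := by omega
            rw [decide_eq_decide.mpr hiff]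
        · rw [List.getElem?_eq_none (show r.length ≤ t by omega)]
          rfl

-- B's result, element-wise
lemma portB_getElem? (matriz : List (List Int)) (J t : Nat) :
    ((List.range J).foldl
      (fun res j =>
        (List.range (matriz.headD []).length).foldl
          (fun r i =>
            if (matriz.getD j []).getD i 0 ≠ 0 ∧ (matriz.getD (j + 1) []).getD i 0 = 0
            then r.set i true else r)
          res)
      (List.replicate (matriz.headD []).length false))[t]?
      = if t < (matriz.headD []).length
        then some (decide (∃ j, j < J ∧ pvCond matriz j t))
        else none := by
  induction J with
  | zero =>
      simp only [List.range_zero, List.foldl_nil, List.getElem?_replicate]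
      split <;> simp
  | succ J ih =>
      rw [List.range_succ, List.foldl_append]
      simp only [List.foldl_cons, List.foldl_nil]
      rw [inner_getElem? (fun i =>
        (matriz.getD J []).getD i 0 ≠ 0 ∧ (matriz.getD (J + 1) []).getD i 0 = 0), ih]
      by_cases ht : t < (matriz.headD []).length
      · rw [if_pos ht, if_pos ht]
        simp only [Option.map_some, Option.some.injEq]
        rw [decide_eq_true ht, Bool.true_and]
        have hiff : (∃ j, j < J + 1 ∧ pvCond matriz j t) ↔
            (∃ j, j < J ∧ pvCond matriz j t) ∨ pvCond matriz J t := by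
          constructor
          · rintro ⟨j, hj, hc⟩
            rcases Nat.lt_succ_iff_lt_or_eq.mp hj with h | rfl
            · exact Or.inl ⟨j, h, hc⟩
            · exact Or.inr hc
          · rintro (⟨j, hj, hc⟩ | hc)
            · exact ⟨j, by omega, hc⟩
            · exact ⟨J, by omega, hc⟩
        have hdec : decide (∃ j, j < J + 1 ∧ pvCond matriz j t)
            = decide ((∃ j, j < J ∧ pvCond matriz j t) ∨ pvCond matriz J t) :=
          decide_eq_decide.mpr hiff
        rw [hdec]
        by_cases h1 : (∃ j, j < J ∧ pvCond matriz j t) <;>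
          by_cases h2 : pvCond matriz J t <;>
            simp [pvCond] at *
      · rw [if_neg ht, if_neg ht]
        rfl

theorem portsEqual (matriz : List (List Int)) :
    tieneCeros_abajo matriz = tieneCeros_abajo_alt matriz := by
  rw [portA_eq]
  apply List.ext_getElem?
  intro t
  unfold tieneCeros_abajo_alt
  rw [portB_getElem? matriz (matriz.length - 1) t]
  by_cases ht : t < (matriz.headD []).length
  · rw [List.getElem?_map, List.getElem?_range ht, if_pos ht]
    rfl
  · rw [List.getElem?_map, List.getElem?_eq_none (by simpa using Nat.le_of_not_lt ht),
      if_neg ht]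
    rfl

-- ===== VERDICT (by name: the statement is the Claim_ definition above) =====
theorem tieneCeros_abajo_spec : Claim_equal_tieneCeros_abajo := by
  intro matriz _ _
  unfold Spec_tieneCeros_abajo
  exact portsEqual matriz
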